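-- pv_equiv track=rewrite | github.com/Ren-Xuan/LeetCode | LCP33.storeWater.py | storeWater
-- ===== SOURCE A (Python) =====
-- def storeWater(bucket, vat) -> int:
--     import math
--     if max(vat) == 0:
--         return 0
--     n = len(bucket)
--
--     res = float('inf')
--
--     min_pour_op = 1     #已经知道不可能是0次了
--     max_pour_op = max(vat) #最多的情况（直接一次又一次地倒）这只是倾倒次数，升容次数再算。
--
--     for pour_time in range(min_pour_op, max_pour_op + 1):
--         cur = pour_time     #总操作 = 倾倒 + 桶升容
--         for i in range(n):
--             ###### 桶的大小至少是多大
--             need_bucket_size = math.ceil(vat[i] / pour_time)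
--             ###### 桶升容的次数
--             need_bucket_op = max(0, need_bucket_size - bucket[i])
--             ###### cur += 桶升容次数
--             cur += need_bucket_op
--
--         res = min(res, cur)
--
--     return res
-- ===== SOURCE B (Python) =====
-- def storeWater(bucket, vat) -> int:
--     import math
--     M = max(vat)
--     if M == 0:
--         return 0
--     # divisor-block candidate enumeration: the per-pour-count cost
--     # sum(max(0, ceil(v/k)-b)) only changes at k = ceil(v/s); collect those
--     # O(sqrt(v)) candidate pour counts per vat and take the min over them.
--     cand = set()
--     for v in vat:
--         if v > 0:
--             r = math.isqrt(v) + 1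
--             for j in range(1, r + 1):
--                 q = -(-v // j)          # ceil(v/j)
--                 cand.add(q)
--                 cand.add(-(-v // q))    # ceil(v/ceil(v/j))
--     return min(k + sum(max(0, -(-v // k) - b) for v, b in zip(vat, bucket))
--                for k in cand)
-- ===== Notes on version B (the rewrite author's own statement) =====
-- stated objective: alternative
-- what changed: B replaces A's scan of every pour count 1..max(vat) by divisor-block candidate enumeration: the per-pour-count cost only changes at pour counts of the form ceil(v/s), so B collects the O(sqrt(v)) candidate pour counts per vat into a set and minimises over those alone.
-- outside the precondition, e.g. on storeWater([1], [-3]): A returns inf, B raises ValueError; on storeWater([1, 2], [3]): A raises IndexError, B returns 3; on storeWater([], []): A raises ValueError, B raises ValueError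
import Mathlib
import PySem

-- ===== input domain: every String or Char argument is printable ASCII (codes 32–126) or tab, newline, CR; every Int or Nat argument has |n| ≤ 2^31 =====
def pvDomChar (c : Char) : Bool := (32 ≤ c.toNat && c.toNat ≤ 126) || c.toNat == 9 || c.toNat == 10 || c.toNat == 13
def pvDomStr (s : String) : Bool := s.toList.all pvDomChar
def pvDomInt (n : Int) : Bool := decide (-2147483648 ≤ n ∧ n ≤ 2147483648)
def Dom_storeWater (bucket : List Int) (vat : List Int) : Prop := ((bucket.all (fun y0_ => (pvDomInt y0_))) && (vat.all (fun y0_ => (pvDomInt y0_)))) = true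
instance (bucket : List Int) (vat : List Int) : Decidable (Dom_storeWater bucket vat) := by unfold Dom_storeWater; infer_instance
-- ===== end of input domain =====

-- B replaces A's scan of every pour count 1..max(vat) by divisor-block candidate
-- enumeration (the per-pour-count cost only changes at pour counts ceil(v/s), so only
-- the O(sqrt v) candidates per vat, gathered in a set, need to be tried); objective: alternative.

-- ceiling division ceil(v/k) as Python computes it with -(-v//k); A's float
-- math.ceil(vat[i]/pour_time) equals this exact integer ceiling on the |n| ≤ 2^31
-- domain (a float quotient of such ints rounds across an integer boundary only
-- for numerators beyond 2^52).
def pyCeil (v k : Int) : Int := -(PySem.Int.floordiv (-v) k)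

-- ===== PORT A =====
def storeWater (bucket : List Int) (vat : List Int) : Int :=
  match PySem.List.max? vat (fun y => y) with
  | none => 0      -- Python raises ValueError here; excluded by Pre_
  | some mv =>
    if mv = 0 then 0
    else
      let n : Int := (bucket.length : Int)
      let res : Option Int :=       -- none plays float('inf')
        (PySem.List.pyRange 1 (mv + 1) 1).foldl (fun res pour_time =>
          let cur :=
            (PySem.List.pyRange 0 n 1).foldl (fun cur i =>
              let need_bucket_size := pyCeil (PySem.List.pyGetD vat i 0) pour_time
              let need_bucket_op := max 0 (need_bucket_size - PySem.List.pyGetD bucket i 0)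
              cur + need_bucket_op) pour_time
          match res with
          | none => some cur
          | some r => some (min r cur)) none
      res.getD 0    -- none only when mv < 0: Python returns float('inf'); excluded by Pre_

-- ===== PORT B =====
def storeWater_alt (bucket : List Int) (vat : List Int) : Int :=
  match PySem.List.max? vat (fun y => y) with
  | none => 0      -- Python raises ValueError here; outside Pre_
  | some M =>
    if M = 0 then 0
    else
      let cand : PySem.Set Int :=
        vat.foldl (fun cand v =>
          if 0 < v then
            (PySem.List.pyRange 1 (((Nat.sqrt v.toNat : Int) + 1) + 1) 1).foldl
              (fun cand j =>
                let q := pyCeil v j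
                PySem.Set.add (PySem.Set.add cand q) (pyCeil v q)) cand
          else cand) PySem.Set.empty
      -- min over the candidate set: a min of ints, independent of set order
      match PySem.List.min? (cand.map (fun k =>
          k + ((vat.zip bucket).map (fun vb => max 0 (pyCeil vb.1 k - vb.2))).sum))
          (fun y => y) with
      | none => 0   -- empty candidate set (no positive vat): Python min() raises ValueError; outside Pre_
      | some r => r

-- ===== PRECONDITION & SPEC =====
-- Pre_ excludes: empty vat (A raises ValueError); all-negative vat (A returns
-- float('inf'), not an int); and len(bucket) > len(vat) with some positive vat
-- (A raises IndexError).
def Pre_storeWater (bucket : List Int) (vat : List Int) : Prop :=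
  (∃ v ∈ vat, 0 ≤ v) ∧ ((∀ v ∈ vat, v ≤ 0) ∨ bucket.length ≤ vat.length)
instance (bucket : List Int) (vat : List Int) : Decidable (Pre_storeWater bucket vat) := by
  unfold Pre_storeWater; infer_instance
def pvWitness_storeWater : List Int × List Int := ([1, 2], [3, 8, 9])
def Spec_storeWater (bucket : List Int) (vat : List Int) (out : Int) : Prop := out = storeWater_alt bucket vat
instance (bucket : List Int) (vat : List Int) (out : Int) : Decidable (Spec_storeWater bucket vat out) := by unfold Spec_storeWater; infer_instance

-- ===== CLAIM (what is proved, stated in full; the proofs are below) =====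
def Claim_equal_storeWater : Prop := ∀ (bucket : List Int) (vat : List Int), Dom_storeWater bucket vat → Pre_storeWater bucket vat → Spec_storeWater bucket vat (storeWater bucket vat)

-- ===== LEMMAS AND PROOFS =====

-- the per-pour-count objective both programs minimise
def pvCost (bucket vat : List Int) (k : Int) : Int :=
  k + ((vat.zip bucket).map (fun vb => max 0 (pyCeil vb.1 k - vb.2))).sum

-- B's candidate set, named for the proofs (definitionally the set built in the port)
def pvCand (vat : List Int) : PySem.Set Int :=
  vat.foldl (fun cand v =>
    if 0 < v then
      (PySem.List.pyRange 1 (((Nat.sqrt v.toNat : Int) + 1) + 1) 1).foldl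
        (fun cand j =>
          let q := pyCeil v j
          PySem.Set.add (PySem.Set.add cand q) (pyCeil v q)) cand
    else cand) PySem.Set.empty

-- ceiling-division bracket
theorem pyCeil_le_iff (v k s : Int) (hk : 0 < k) : pyCeil v k ≤ s ↔ v ≤ k * s := by
  unfold pyCeil
  rw [neg_le, PySem.Int.le_floordiv_iff_mul_le hk]
  constructor <;> intro h <;> nlinarith

theorem pyCeil_one_le (v k : Int) (hk : 0 < k) (hv : 1 ≤ v) : 1 ≤ pyCeil v k := by
  by_contra h
  push_neg at h
  have h0 : pyCeil v k ≤ 0 := by omega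
  have := (pyCeil_le_iff v k 0 hk).mp h0
  rw [mul_zero] at this
  omega

theorem pyCeil_le_self (v k : Int) (hk : 1 ≤ k) (hv : 1 ≤ v) : pyCeil v k ≤ v :=
  (pyCeil_le_iff v k v (by omega)).mpr (by nlinarith)

theorem pyCeil_one (v : Int) : pyCeil v 1 = v := by
  unfold pyCeil
  rw [PySem.Int.floordiv_eq_ediv_of_pos one_pos, Int.ediv_one]
  simp

theorem pyCeil_self (v : Int) (hv : 1 ≤ v) : pyCeil v v = 1 := by
  unfold pyCeil
  rw [PySem.Int.neg_floordiv_neg_eq_iff_of_pos (by omega)]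
  constructor <;> nlinarith

-- for nonpositive v the ceiling is monotone in the divisor
theorem pyCeil_mono_nonpos (v k : Int) (hv : v ≤ 0) (hk : 2 ≤ k) :
    pyCeil v (k - 1) ≤ pyCeil v k := by
  have hks : (0 : Int) < k := by omega
  have hk1 : (0 : Int) < k - 1 := by omega
  have hs0 : pyCeil v k ≤ 0 := (pyCeil_le_iff v k 0 hks).mpr (by nlinarith)
  have hvk : v ≤ k * pyCeil v k := (pyCeil_le_iff v k (pyCeil v k) hks).mp le_rfl
  exact (pyCeil_le_iff v (k - 1) (pyCeil v k) hk1).mpr (by nlinarith)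

-- a change point of ceil(v/·) at k satisfies k = ceil(v/ceil(v/k))
theorem pyCeil_change (v k : Int) (hv : 1 ≤ v) (hk : 2 ≤ k)
    (hne : pyCeil v (k - 1) ≠ pyCeil v k) : k = pyCeil v (pyCeil v k) := by
  have hkp : (0 : Int) < k := by omega
  have hk1 : (0 : Int) < k - 1 := by omega
  set s := pyCeil v k with hs
  have hsb : (s - 1) * k < v ∧ v ≤ s * k :=
    (PySem.Int.neg_floordiv_neg_eq_iff_of_pos (a := v) (q := s) hkp).mp hs.symm
  have hs1 : 1 ≤ s := pyCeil_one_le v k hkp hv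
  have hsp : (0 : Int) < s := by omega
  have hle : pyCeil v s ≤ k := (pyCeil_le_iff v s k hsp).mpr (by nlinarith [hsb.2])
  have hge : k ≤ pyCeil v s := by
    by_contra hlt
    push_neg at hlt
    have h1 : pyCeil v s ≤ k - 1 := by omega
    have h2 : v ≤ s * (k - 1) := (pyCeil_le_iff v s (k - 1) hsp).mp h1
    have h3 : pyCeil v (k - 1) ≤ s := (pyCeil_le_iff v (k - 1) s hk1).mpr (by nlinarith)
    have h4 : s ≤ pyCeil v (k - 1) := by
      by_contra h5
      push_neg at h5
      have h6 : pyCeil v (k - 1) ≤ s - 1 := by omega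
      have h7 : v ≤ (k - 1) * (s - 1) := (pyCeil_le_iff v (k - 1) (s - 1) hk1).mp h6
      nlinarith [hsb.1, hs1]
    exact hne (by omega)
  omega

-- at a change point with k ≤ v, either k or ceil(v/k) is at most isqrt(v)+1
theorem pyCeil_change_small (v k : Int) (hv : 1 ≤ v) (hk : 2 ≤ k) (hkv : k ≤ v) :
    k ≤ (Nat.sqrt v.toNat : Int) + 1 ∨ pyCeil v k ≤ (Nat.sqrt v.toNat : Int) + 1 := by
  set r : Int := (Nat.sqrt v.toNat : Int) with hr
  by_cases hcase : k ≤ r + 1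
  · exact Or.inl hcase
  · right
    push_neg at hcase
    have hv' : (v.toNat : Int) = v := Int.toNat_of_nonneg (by omega)
    have hsqi : v < (r + 1) * (r + 1) := by
      have h := Nat.lt_succ_sqrt' v.toNat
      have h2 : (v.toNat : Int) < ((Nat.sqrt v.toNat + 1 : Nat) : Int) ^ 2 := by
        exact_mod_cast h
      rw [hv'] at h2
      push_cast at h2
      rw [hr]
      nlinarith [h2]
    have hr0 : (0 : Int) ≤ r := by rw [hr]; positivity
    refine (pyCeil_le_iff v k (r + 1) (by omega)).mpr ?_
    nlinarith [mul_le_mul_of_nonneg_right (show r + 2 ≤ k by omega) (show (0:Int) ≤ r + 1 by omega)]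

-- membership in the inner candidate-adding loop
theorem mem_inner_fold (v : Int) (l : List Int) (s : PySem.Set Int) (y : Int) :
    y ∈ l.foldl (fun cand j =>
        let q := pyCeil v j
        PySem.Set.add (PySem.Set.add cand q) (pyCeil v q)) s ↔
      y ∈ s ∨ ∃ j ∈ l, y = pyCeil v j ∨ y = pyCeil v (pyCeil v j) := by
  induction l generalizing s with
  | nil => simp
  | cons j t ih =>
    simp only [List.foldl_cons]
    rw [ih]
    simp only [PySem.Set.mem_add, List.mem_cons]
    constructor
    · rintro (((h | h) | h) | ⟨j', hj', h⟩)
      · exact Or.inl h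
      · exact Or.inr ⟨j, Or.inl rfl, Or.inl h⟩
      · exact Or.inr ⟨j, Or.inl rfl, Or.inr h⟩
      · exact Or.inr ⟨j', Or.inr hj', h⟩
    · rintro (h | ⟨j', (rfl | hj'), h⟩)
      · exact Or.inl (Or.inl (Or.inl h))
      · rcases h with h | h
        · exact Or.inl (Or.inl (Or.inr h))
        · exact Or.inl (Or.inr h)
      · exact Or.inr ⟨j', hj', h⟩

-- membership in B's candidate set
theorem mem_pvCand (vat : List Int) (y : Int) :
    y ∈ pvCand vat ↔ ∃ v ∈ vat, 0 < v ∧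
      ∃ j ∈ PySem.List.pyRange 1 (((Nat.sqrt v.toNat : Int) + 1) + 1) 1,
        (y = pyCeil v j ∨ y = pyCeil v (pyCeil v j)) := by
  have main : ∀ (l : List Int) (s : PySem.Set Int),
      y ∈ l.foldl (fun cand v =>
        if 0 < v then
          (PySem.List.pyRange 1 (((Nat.sqrt v.toNat : Int) + 1) + 1) 1).foldl
            (fun cand j =>
              let q := pyCeil v j
              PySem.Set.add (PySem.Set.add cand q) (pyCeil v q)) cand
        else cand) s ↔
      y ∈ s ∨ ∃ v ∈ l, 0 < v ∧
        ∃ j ∈ PySem.List.pyRange 1 (((Nat.sqrt v.toNat : Int) + 1) + 1) 1,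
          (y = pyCeil v j ∨ y = pyCeil v (pyCeil v j)) := by
    intro l
    induction l with
    | nil => intro s; simp
    | cons v t ih =>
      intro s
      simp only [List.foldl_cons, List.mem_cons]
      by_cases hv : 0 < v
      · rw [if_pos hv, ih, mem_inner_fold]
        constructor
        · rintro ((h | ⟨j, hj, h⟩) | ⟨v', hv', h⟩)
          · exact Or.inl h
          · exact Or.inr ⟨v, Or.inl rfl, hv, j, hj, h⟩
          · exact Or.inr ⟨v', Or.inr hv', h⟩
        · rintro (h | ⟨v', (rfl | hv'), h⟩)
          · exact Or.inl (Or.inl h)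
          · exact Or.inl (Or.inr h.2)
          · exact Or.inr ⟨v', hv', h⟩
      · rw [if_neg hv, ih]
        constructor
        · rintro (h | ⟨v', hv', h⟩)
          · exact Or.inl h
          · exact Or.inr ⟨v', Or.inr hv', h⟩
        · rintro (h | ⟨v', (rfl | hv'), h⟩)
          · exact Or.inl h
          · exact absurd h.1 hv
          · exact Or.inr ⟨v', hv', h⟩
  unfold pvCand
  rw [main vat PySem.Set.empty]
  simp [PySem.Set.empty]

-- every candidate is a legal pour count
theorem pvCand_bounds (vat : List Int) (mv y : Int)
    (hmax : PySem.List.max? vat (fun z => z) = some mv) (hy : y ∈ pvCand vat) :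
    1 ≤ y ∧ y ≤ mv := by
  rw [mem_pvCand] at hy
  obtain ⟨v, hvm, hv, j, hj, hy⟩ := hy
  have hj1 : 1 ≤ j := (PySem.List.mem_pyRange_one.mp hj).1
  have hvmv : v ≤ mv := PySem.List.max?_isMax hmax v hvm
  have hq1 : 1 ≤ pyCeil v j := pyCeil_one_le v j (by omega) (by omega)
  rcases hy with rfl | rfl
  · exact ⟨hq1, le_trans (pyCeil_le_self v j hj1 (by omega)) hvmv⟩
  · exact ⟨pyCeil_one_le v _ (by omega) (by omega),
      le_trans (pyCeil_le_self v _ hq1 (by omega)) hvmv⟩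

-- 1 is always a candidate when the maximum is positive
theorem one_mem_pvCand (vat : List Int) (mv : Int)
    (hmax : PySem.List.max? vat (fun z => z) = some mv) (hmv : 1 ≤ mv) :
    (1 : Int) ∈ pvCand vat := by
  rw [mem_pvCand]
  refine ⟨mv, PySem.List.max?_mem hmax, by omega, 1, ?_, Or.inr ?_⟩
  · exact PySem.List.mem_pyRange_one.mpr ⟨le_refl 1, by omega⟩
  · rw [pyCeil_one, pyCeil_self mv hmv]

-- off a candidate, the cost strictly grows from k-1 to k
theorem pvCost_step (bucket vat : List Int) (k : Int) (hk : 2 ≤ k)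
    (hnc : k ∉ pvCand vat) : pvCost bucket vat (k - 1) < pvCost bucket vat k := by
  unfold pvCost
  have hsum : ((vat.zip bucket).map (fun vb => max 0 (pyCeil vb.1 (k - 1) - vb.2))).sum
      ≤ ((vat.zip bucket).map (fun vb => max 0 (pyCeil vb.1 k - vb.2))).sum := by
    apply List.sum_le_sum
    intro vb hvb
    have hvmem : vb.1 ∈ vat := (List.of_mem_zip (by simpa using hvb)).1
    by_cases hv : vb.1 ≤ 0
    · have := pyCeil_mono_nonpos vb.1 k hv hk
      exact max_le_max le_rfl (by omega)
    · push_neg at hv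
      have hv1 : 1 ≤ vb.1 := by omega
      have heq : pyCeil vb.1 (k - 1) = pyCeil vb.1 k := by
        by_contra hne
        have hchg := pyCeil_change vb.1 k hv1 hk hne
        have hs1 : 1 ≤ pyCeil vb.1 k := pyCeil_one_le vb.1 k (by omega) hv1
        have hkv : k ≤ vb.1 := by
          rw [hchg]
          exact pyCeil_le_self vb.1 (pyCeil vb.1 k) hs1 hv1
        apply hnc
        rw [mem_pvCand]
        rcases pyCeil_change_small vb.1 k hv1 hk hkv with hsmall | hsmall
        · exact ⟨vb.1, hvmem, by omega, k,
            PySem.List.mem_pyRange_one.mpr ⟨by omega, by omega⟩, Or.inr hchg⟩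
        · exact ⟨vb.1, hvmem, by omega, pyCeil vb.1 k,
            PySem.List.mem_pyRange_one.mpr ⟨by omega, by omega⟩, Or.inl hchg⟩
      rw [heq]
  omega

-- every pour count is dominated by a candidate
theorem pvCand_dominates (bucket vat : List Int)
    (h1 : (1 : Int) ∈ pvCand vat) :
    ∀ n : Nat, ∀ k : Int, k = (n : Int) + 1 →
      ∃ c ∈ pvCand vat, pvCost bucket vat c ≤ pvCost bucket vat k := by
  intro n
  induction n with
  | zero => intro k hk; exact ⟨1, h1, by rw [hk]; norm_num⟩
  | succ n ih =>
    intro k hk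
    by_cases hc : k ∈ pvCand vat
    · exact ⟨k, hc, le_rfl⟩
    · obtain ⟨c, hcm, hcle⟩ := ih (k - 1) (by omega)
      exact ⟨c, hcm, le_trans hcle (le_of_lt (pvCost_step bucket vat k (by omega) hc))⟩

-- running min with Option accumulator = min? of the mapped list
theorem foldl_min_opt_some (t : List Int) (g : Int → Int) :
    ∀ r : Int, t.foldl (fun res x =>
        match res with | none => some (g x) | some r => some (min r (g x))) (some r)
      = some ((t.map g).foldl min r) := by
  induction t with
  | nil => intro r; simp
  | cons x t ih => intro r; simpa using ih (min r (g x))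

theorem foldl_min_opt (l : List Int) (g : Int → Int) :
    l.foldl (fun res x =>
        match res with | none => some (g x) | some r => some (min r (g x))) none
      = PySem.List.min? (l.map g) (fun y => y) := by
  cases l with
  | nil => simp [PySem.List.min?]
  | cons x t =>
    simp only [List.foldl_cons, List.map_cons]
    rw [PySem.List.min?_id_cons, foldl_min_opt_some]

-- A's indexed inner scan reads the same pairs B zips
theorem map_idx_eq_map_zip (vat bucket : List Int) (g : Int × Int → Int)
    (hlen : bucket.length ≤ vat.length) :
    (PySem.List.pyRange 0 (bucket.length : Int) 1).map
        (fun i => g (PySem.List.pyGetD vat i 0, PySem.List.pyGetD bucket i 0))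
      = (vat.zip bucket).map g := by
  apply List.ext_getElem
  · simp [PySem.List.length_pyRange_one, Nat.min_eq_right hlen]
  · intro k h1 h2
    have hk : k < bucket.length := by
      simpa [Nat.min_eq_right hlen] using h2
    have hkv : k < vat.length := lt_of_lt_of_le hk hlen
    simp only [List.getElem_map, PySem.List.getElem_pyRange_one]
    have e1 : PySem.List.pyGetD vat ((0 : Int) + (k : Int)) 0 = vat[k] := by
      rw [zero_add]
      rw [show ((k : Int)) = ((k : Nat) : Int) from rfl]
      rw [PySem.List.pyGetD_natCast]
      exact List.getD_eq_getElem vat 0 hkv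
    have e2 : PySem.List.pyGetD bucket ((0 : Int) + (k : Int)) 0 = bucket[k] := by
      rw [zero_add]
      rw [show ((k : Int)) = ((k : Nat) : Int) from rfl]
      rw [PySem.List.pyGetD_natCast]
      exact List.getD_eq_getElem bucket 0 hk
    rw [e1, e2, List.getElem_zip]

-- the two minimisations agree
theorem min_range_eq_min_cand (bucket vat : List Int) (mv : Int)
    (hmax : PySem.List.max? vat (fun z => z) = some mv) (hmv : 1 ≤ mv) :
    PySem.List.min? ((PySem.List.pyRange 1 (mv + 1) 1).map (pvCost bucket vat)) (fun y => y)
      = PySem.List.min? ((pvCand vat).map (pvCost bucket vat)) (fun y => y) := by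
  have h1c : (1 : Int) ∈ pvCand vat := one_mem_pvCand vat mv hmax hmv
  have h1r : (1 : Int) ∈ PySem.List.pyRange 1 (mv + 1) 1 :=
    PySem.List.mem_pyRange_one.mpr ⟨le_refl 1, by omega⟩
  cases hm1 : PySem.List.min? ((PySem.List.pyRange 1 (mv + 1) 1).map (pvCost bucket vat)) (fun y => y) with
  | none =>
    exfalso
    rw [PySem.List.min?_eq_none_iff, List.map_eq_nil_iff] at hm1
    rw [hm1] at h1r
    simp at h1r
  | some m1 =>
    cases hm2 : PySem.List.min? ((pvCand vat).map (pvCost bucket vat)) (fun y => y) with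
    | none =>
      exfalso
      rw [PySem.List.min?_eq_none_iff, List.map_eq_nil_iff] at hm2
      rw [hm2] at h1c
      simp at h1c
    | some m2 =>
      congr 1
      obtain ⟨c2, hc2m, hc2e⟩ := List.mem_map.mp (PySem.List.min?_mem hm2)
      obtain ⟨k1, hk1m, hk1e⟩ := List.mem_map.mp (PySem.List.min?_mem hm1)
      have h12 : m1 ≤ m2 := by
        have hb := pvCand_bounds vat mv c2 hmax hc2m
        have : pvCost bucket vat c2 ∈
            (PySem.List.pyRange 1 (mv + 1) 1).map (pvCost bucket vat) :=
          List.mem_map.mpr ⟨c2, PySem.List.mem_pyRange_one.mpr ⟨hb.1, by omega⟩, rfl⟩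
        have := PySem.List.min?_isMin hm1 _ this
        omega
      have h21 : m2 ≤ m1 := by
        have hk1b := PySem.List.mem_pyRange_one.mp hk1m
        obtain ⟨c, hcm, hcle⟩ := pvCand_dominates bucket vat h1c (k1 - 1).toNat k1 (by omega)
        have : pvCost bucket vat c ∈ (pvCand vat).map (pvCost bucket vat) :=
          List.mem_map.mpr ⟨c, hcm, rfl⟩
        have := PySem.List.min?_isMin hm2 _ this
        omega
      omega

-- ===== VERDICT (by name: the statement is the Claim_ definition above) =====
theorem storeWater_spec : Claim_equal_storeWater := by
  intro bucket vat _ hpre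
  obtain ⟨⟨v0, hv0m, hv0⟩, hdisj⟩ := hpre
  unfold Spec_storeWater storeWater storeWater_alt
  cases hmax : PySem.List.max? vat (fun y => y) with
  | none => rfl
  | some mv =>
    have hmv0 : 0 ≤ mv := le_trans hv0 (PySem.List.max?_isMax hmax v0 hv0m)
    by_cases h0 : mv = 0
    · simp [h0]
    · simp only [h0, if_false]
      have hmv1 : 1 ≤ mv := by omega
      have hlen : bucket.length ≤ vat.length := by
        rcases hdisj with h | h
        · exact absurd (le_antisymm (h mv (PySem.List.max?_mem hmax)) hmv0) h0
        · exact h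
      have hA :
          (PySem.List.pyRange 1 (mv + 1) 1).foldl (fun res pour_time =>
            let cur :=
              (PySem.List.pyRange 0 (bucket.length : Int) 1).foldl (fun cur i =>
                let need_bucket_size := pyCeil (PySem.List.pyGetD vat i 0) pour_time
                let need_bucket_op := max 0 (need_bucket_size - PySem.List.pyGetD bucket i 0)
                cur + need_bucket_op) pour_time
            match res with
            | none => some cur
            | some r => some (min r cur)) none
          = PySem.List.min? ((PySem.List.pyRange 1 (mv + 1) 1).map (pvCost bucket vat))
              (fun y => y) := by
        rw [foldl_min_opt (PySem.List.pyRange 1 (mv + 1) 1)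
              (fun t => (PySem.List.pyRange 0 (bucket.length : Int) 1).foldl
                (fun cur i => cur + max 0
                  (pyCeil (PySem.List.pyGetD vat i 0) t - PySem.List.pyGetD bucket i 0)) t)]
        congr 1
        refine List.map_congr_left (fun t _ => ?_)
        rw [PySem.List.foldl_add (PySem.List.pyRange 0 (bucket.length : Int) 1)
              (fun i => max 0
                (pyCeil (PySem.List.pyGetD vat i 0) t - PySem.List.pyGetD bucket i 0)) t]
        unfold pvCost
        congr 1
        exact congrArg List.sum
          (map_idx_eq_map_zip vat bucket (fun vb => max 0 (pyCeil vb.1 t - vb.2)) hlen)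
      rw [hA]
      have hB : (vat.foldl (fun cand v =>
          if 0 < v then
            (PySem.List.pyRange 1 (((Nat.sqrt v.toNat : Int) + 1) + 1) 1).foldl
              (fun cand j =>
                let q := pyCeil v j
                PySem.Set.add (PySem.Set.add cand q) (pyCeil v q)) cand
          else cand) PySem.Set.empty) = pvCand vat := rfl
      rw [hB]
      rw [show (fun k => k + ((vat.zip bucket).map
            (fun vb => max 0 (pyCeil vb.1 k - vb.2))).sum) = pvCost bucket vat from rfl]
      rw [min_range_eq_min_cand bucket vat mv hmax hmv1]
      cases hm : PySem.List.min? ((pvCand vat).map (pvCost bucket vat)) (fun y => y) with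
      | none =>
        exfalso
        have h1c := one_mem_pvCand vat mv hmax hmv1
        rw [PySem.List.min?_eq_none_iff, List.map_eq_nil_iff] at hm
        rw [hm] at h1c
        simp at h1c
      | some r => rfl
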